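-- pv_equiv track=rewrite | github.com/ConnorMarcus/Blackjack-Project | Blackjack.py | check_bust_and_total
-- ===== SOURCE A (Python) =====
-- def check_bust_and_total(hand) -> tuple:
--     total = 0
--     has_a_high_ace = False
--     card = 0
--
--     while (card < len(hand)):
--         if ((hand[card][0] == "A") and (total <= 10)):
--             total += 11
--             has_a_high_ace = True
--         elif((hand[card][0] == "A") and (total > 10)):
--             total += 1
--         else:
--             total += card_values[hand[card][0]]
--         if((total > 21) and (has_a_high_ace)):
--             total -= 10
--             has_a_high_ace = False
--         card += 1
--
--     if (total <= 21):
--         return False, total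
--     else:
--         return True, total
--
-- card_values = {"2":2, "3":3, "4":4, "5":5, "6":6, "7":7, "8":8, "9":9, "1":10,
--                "J":10, "Q":10, "K":10}
-- ===== SOURCE B (Python) =====
-- card_values = {"2":2, "3":3, "4":4, "5":5, "6":6, "7":7, "8":8, "9":9, "1":10,
--                "J":10, "Q":10, "K":10}
--
-- def check_bust_and_total(hand) -> tuple:
--     total = 0
--     aces = 0
--     for card in hand:
--         if card[0] == "A":
--             total += 11
--             aces += 1
--         else:
--             total += card_values[card[0]]
--     while total > 21 and aces > 0:
--         total -= 10
--         aces -= 1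
--     return total > 21, total
-- ===== Notes on version B (the rewrite author's own statement) =====
-- stated objective: simpler
-- what changed: Replaces A's index-driven while loop that interleaves ace promotion/demotion with a stateful has_a_high_ace flag by a two-phase computation: one pass summing card values (every ace as 11, counting aces), then a separate demotion loop 'while total > 21 and aces > 0: total -= 10; aces -= 1'.
import Mathlib
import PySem

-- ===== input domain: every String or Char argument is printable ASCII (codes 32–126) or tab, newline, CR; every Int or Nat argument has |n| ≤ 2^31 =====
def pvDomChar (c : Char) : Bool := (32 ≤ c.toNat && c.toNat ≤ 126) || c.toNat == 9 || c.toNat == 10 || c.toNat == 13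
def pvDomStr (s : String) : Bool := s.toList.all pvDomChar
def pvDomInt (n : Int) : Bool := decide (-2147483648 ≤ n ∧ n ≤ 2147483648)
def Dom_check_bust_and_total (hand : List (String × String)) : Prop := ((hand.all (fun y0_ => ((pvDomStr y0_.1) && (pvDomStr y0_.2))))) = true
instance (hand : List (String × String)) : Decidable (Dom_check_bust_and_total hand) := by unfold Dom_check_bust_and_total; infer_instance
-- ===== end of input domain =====

-- B sums the hand in one pass (aces as 11, counting aces) and demotes aces in a separate
-- while-loop afterwards (objective: simpler); same return value as A on hands of valid ranks.

-- ===== PORT A =====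
def cardValuesPV : PySem.Dict String Int :=
  PySem.Dict.ofList [("2",2), ("3",3), ("4",4), ("5",5), ("6",6), ("7",7), ("8",8), ("9",9),
                     ("1",10), ("J",10), ("Q",10), ("K",10)]

-- A's while over indices as structural recursion over the remaining hand, state (total, has_a_high_ace);
-- the trailing 'if total > 21 and has_a_high_ace' statement is transcribed inside each branch
-- (in the first branch has_a_high_ace has just been set to True).
-- Pre_ guarantees every dict lookup hits, so getD's default 0 is never used (KeyError in Python).
def loopA : List (String × String) → Int → Bool → Int
  | [], total, _ => total
  | c :: rest, total, hi =>
    if c.1 == "A" && decide (total ≤ 10) then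
      let t1 := total + 11
      if decide (t1 > 21) then loopA rest (t1 - 10) false else loopA rest t1 true
    else if c.1 == "A" && decide (total > 10) then
      let t1 := total + 1
      if decide (t1 > 21) && hi then loopA rest (t1 - 10) false else loopA rest t1 hi
    else
      let t1 := total + cardValuesPV.getD c.1 0
      if decide (t1 > 21) && hi then loopA rest (t1 - 10) false else loopA rest t1 hi

def check_bust_and_total (hand : List (String × String)) : Bool × Int :=
  let total := loopA hand 0 false
  if total ≤ 21 then (false, total) else (true, total)

-- ===== PORT B =====
-- Phase 1: one pass summing (aces as 11) while counting aces.
def sumB : List (String × String) → Int → Nat → Int × Nat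
  | [], total, aces => (total, aces)
  | c :: rest, total, aces =>
    if c.1 == "A" then sumB rest (total + 11) (aces + 1)
    else sumB rest (total + cardValuesPV.getD c.1 0) aces

-- Phase 2: while total > 21 and aces > 0: total -= 10; aces -= 1
def demoteB : Int → Nat → Int
  | total, 0 => total
  | total, a + 1 => if total > 21 then demoteB (total - 10) a else total

def check_bust_and_total_alt (hand : List (String × String)) : Bool × Int :=
  let p := sumB hand 0 0
  let total := demoteB p.1 p.2
  (decide (total > 21), total)

-- ===== PRECONDITION & SPEC =====
-- Pre_ excludes exactly the hands containing a rank that is neither "A" nor a key of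
-- card_values, on which the Python A raises KeyError (B raises there too).
def Pre_check_bust_and_total (hand : List (String × String)) : Prop :=
  ∀ c ∈ hand, c.1 ∈ ["A", "2", "3", "4", "5", "6", "7", "8", "9", "1", "J", "Q", "K"]
instance (hand : List (String × String)) : Decidable (Pre_check_bust_and_total hand) := by
  unfold Pre_check_bust_and_total; infer_instance

def pvWitness_check_bust_and_total : (List (String × String)) :=
  [("A", "spades"), ("K", "hearts"), ("7", "clubs")]

def Spec_check_bust_and_total (hand : List (String × String)) (out : Bool × Int) : Prop := out = check_bust_and_total_alt hand
instance (hand : List (String × String)) (out : Bool × Int) : Decidable (Spec_check_bust_and_total hand out) := by unfold Spec_check_bust_and_total; infer_instance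

-- ===== CLAIM (what is proved, stated in full; the proofs are below) =====
def Claim_equal_check_bust_and_total : Prop := ∀ (hand : List (String × String)), Dom_check_bust_and_total hand → Pre_check_bust_and_total hand → Spec_check_bust_and_total hand (check_bust_and_total hand)

-- ===== LEMMAS AND PROOFS =====

-- a non-ace valid rank is worth between 2 and 10
lemma value_bounds (r : String)
    (hmem : r ∈ ["A", "2", "3", "4", "5", "6", "7", "8", "9", "1", "J", "Q", "K"])
    (hne : ¬ (r == "A") = true) :
    2 ≤ cardValuesPV.getD r 0 ∧ cardValuesPV.getD r 0 ≤ 10 := by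
  fin_cases hmem
  · exact absurd (by decide) hne
  all_goals exact ⟨by decide, by decide⟩

-- closed form of the demotion loop when each ace contributed at least 1 to s
lemma demote_closed (a : Nat) : ∀ s : Int, (a : Int) ≤ s →
    demoteB (s + 10 * a) a = if a ≠ 0 ∧ s + 10 ≤ 21 then s + 10 else s := by
  induction a with
  | zero => intro s _; simp [demoteB]
  | succ a ih =>
    intro s hs
    rcases Nat.eq_zero_or_pos a with h0 | hpos
    · subst h0
      simp only [demoteB]
      split_ifs <;> omega
    · simp only [demoteB]
      push_cast at hs ⊢
      split_ifs with hcond h2 <;>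
        [ (rw [show s + 10 * ((a : Int) + 1) - 10 = s + 10 * (a : Int) by ring,
               ih s (by omega)]
           split_ifs <;> omega);
          (rw [show s + 10 * ((a : Int) + 1) - 10 = s + 10 * (a : Int) by ring,
               ih s (by omega)]
           split_ifs <;> omega);
          omega; omega ]

-- loop invariant: A's running state (t, hi) against the prefix sums s (aces as 1) and a (ace count);
-- B's phase-1 accumulator over the same prefix is s + 10*a.
lemma loop_inv (hand : List (String × String))
    (hP : Pre_check_bust_and_total hand) :
    ∀ (t s : Int) (a : Nat) (hi : Bool),
    (a : Int) ≤ s →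
    (hi = true → t = s + 10 ∧ t ≤ 21 ∧ 1 ≤ a) →
    (hi = false → t = s ∧ (a = 0 ∨ 11 < s)) →
    loopA hand t hi = demoteB (sumB hand (s + 10 * a) a).1 (sumB hand (s + 10 * a) a).2 := by
  induction hand with
  | nil =>
    intro t s a hi hs hT hF
    simp only [loopA, sumB]
    rw [demote_closed a s hs]
    cases hi with
    | true =>
      obtain ⟨ht, h21, ha⟩ := hT rfl
      rw [if_pos ⟨by omega, by omega⟩]; omega
    | false =>
      obtain ⟨ht, hc⟩ := hF rfl
      rw [if_neg (by omega)]; omega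
  | cons c rest ih =>
    intro t s a hi hs hT hF
    have hc := hP c (List.mem_cons_self ..)
    have hrest : Pre_check_bust_and_total rest := fun x hx => hP x (List.mem_cons_of_mem _ hx)
    by_cases hA : (c.1 == "A") = true
    · -- ace card
      simp only [loopA, sumB, hA, Bool.true_and, if_true, decide_eq_true_eq]
      cases hi with
      | true =>
        obtain ⟨ht, h21, ha⟩ := hT rfl
        rw [if_neg (by omega : ¬ t ≤ 10), if_pos (by omega : 10 < t)]
        have hS : s + 10 * (a : Int) + 11 = (s + 1) + 10 * ((a + 1 : Nat) : Int) := by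
          push_cast; ring
        rw [hS]
        by_cases hd : t + 1 > 21
        · rw [if_pos (by simp [hd])]
          exact ih hrest (t + 1 - 10) (s + 1) (a + 1) false (by push_cast; omega)
            (by simp) (fun _ => ⟨by omega, Or.inr (by omega)⟩)
        · rw [if_neg (by simp; omega)]
          exact ih hrest (t + 1) (s + 1) (a + 1) true (by push_cast; omega)
            (fun _ => ⟨by omega, by omega, by omega⟩) (by simp)
      | false =>
        obtain ⟨ht, hor⟩ := hF rfl
        have hS : s + 10 * (a : Int) + 11 = (s + 1) + 10 * ((a + 1 : Nat) : Int) := by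
          push_cast; ring
        rw [hS]
        by_cases hlo : t ≤ 10
        · rw [if_pos hlo, if_neg (show ¬ t + 11 > 21 by omega)]
          exact ih hrest (t + 11) (s + 1) (a + 1) true (by push_cast; omega)
            (fun _ => ⟨by omega, by omega, by omega⟩) (by simp)
        · rw [if_neg hlo, if_pos (show 10 < t by omega),
              if_neg (show ¬ ((decide (t + 1 > 21) && false) = true) by simp)]
          exact ih hrest (t + 1) (s + 1) (a + 1) false (by push_cast; omega)
            (by simp) (fun _ => ⟨by omega, Or.inr (by omega)⟩)
    · -- non-ace card
      obtain ⟨hv2, hv10⟩ := value_bounds c.1 hc hA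
      simp only [loopA, sumB, hA, Bool.false_and, if_false, Bool.false_eq_true,
        decide_eq_true_eq]
      set v := cardValuesPV.getD c.1 0 with hvdef
      have hS : s + 10 * (a : Int) + v = (s + v) + 10 * (a : Int) := by ring
      rw [hS]
      cases hi with
      | true =>
        obtain ⟨ht, h21, ha⟩ := hT rfl
        by_cases hd : t + v > 21
        · rw [if_pos (by simp [hd])]
          exact ih hrest (t + v - 10) (s + v) a false (by omega)
            (by simp) (fun _ => ⟨by omega, Or.inr (by omega)⟩)
        · rw [if_neg (by simp; omega)]
          exact ih hrest (t + v) (s + v) a true (by omega)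
            (fun _ => ⟨by omega, by omega, ha⟩) (by simp)
      | false =>
        obtain ⟨ht, hor⟩ := hF rfl
        rw [if_neg (by simp)]
        exact ih hrest (t + v) (s + v) a false (by omega)
          (by simp)
          (fun _ => ⟨by omega, by rcases hor with h0 | h11
                                  · exact Or.inl h0
                                  · exact Or.inr (by omega)⟩)

lemma totals_eq (hand : List (String × String)) (hP : Pre_check_bust_and_total hand) :
    loopA hand 0 false = demoteB (sumB hand 0 0).1 (sumB hand 0 0).2 := by
  have := loop_inv hand hP 0 0 0 false (by norm_num)
    (by simp) (fun _ => ⟨rfl, Or.inl rfl⟩)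
  simpa using this

-- ===== VERDICT (by name: the statement is the Claim_ definition above) =====
theorem check_bust_and_total_spec : Claim_equal_check_bust_and_total := by
  intro hand _ hP
  have h := totals_eq hand hP
  simp only [Spec_check_bust_and_total, check_bust_and_total, check_bust_and_total_alt, h]
  split_ifs with hle <;> simp [Prod.ext_iff] <;> omega
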